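-- pv_equiv track=rewrite | github.com/GeniiMisli901203/PycharmProjects | ClassWork/pract6/6.1.py | markov
-- ===== SOURCE A (Python) =====
-- def markov(input_string, rules):
--     tape = input_string
--     i = 0
--     while i < len(tape):
--         for pattern, replacement in rules:
--             if tape[i:i + len(pattern)] == pattern:
--                 tape = tape[:i] + replacement + tape[i + len(pattern):]
--                 i += len(replacement)
--                 break
--         else:
--             i += 1
--     return tape
-- ===== SOURCE B (Python) =====
-- def markov(input_string, rules):
--     pieces = []
--     rest = input_string
--     while rest:
--         for pattern, replacement in rules:
--             if rest.startswith(pattern):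
--                 pieces.append(replacement)
--                 rest = rest[len(pattern):]
--                 break
--         else:
--             pieces.append(rest[0])
--             rest = rest[1:]
--     return ''.join(pieces)
-- ===== Notes on version B (the rewrite author's own statement) =====
-- stated objective: alternative
-- what changed: A keeps the whole tape and an index into it, rebuilding the tape by slicing around the index at every replacement; B keeps no index and never rebuilds a tape: it consumes the remaining suffix of the original string, emitting each replacement (or the leading character) into a list of pieces joined once at the end.
-- outside the precondition, e.g. on markov('a', [('a', 'b'), ('', 'x')]): A returns 'b', B returns 'b'
import Mathlib
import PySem

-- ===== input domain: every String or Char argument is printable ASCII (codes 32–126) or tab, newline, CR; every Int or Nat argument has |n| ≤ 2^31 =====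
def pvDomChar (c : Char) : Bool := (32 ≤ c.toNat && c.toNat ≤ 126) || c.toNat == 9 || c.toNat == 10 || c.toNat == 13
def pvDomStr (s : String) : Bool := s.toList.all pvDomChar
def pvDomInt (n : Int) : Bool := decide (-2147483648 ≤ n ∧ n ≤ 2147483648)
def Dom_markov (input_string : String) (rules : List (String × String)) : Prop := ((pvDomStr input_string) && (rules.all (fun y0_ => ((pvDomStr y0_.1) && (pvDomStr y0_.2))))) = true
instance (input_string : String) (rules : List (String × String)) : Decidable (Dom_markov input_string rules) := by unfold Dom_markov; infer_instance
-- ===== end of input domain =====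

-- B drops A's tape-with-index surgery: it consumes the remaining suffix of the original string,
-- emitting replacements (or the leading character) into a piece list joined once (an alternative decomposition).

-- ===== PORT A =====
-- first rule (pattern, replacement) with tape[i:i + len(pattern)] == pattern (the for/else of A)
def markovFind (tape : List Char) (i : Int) : List (String × String) → Option (String × String)
  | [] => none
  | (p, r) :: rs =>
    if PySem.List.slice tape (some i) (some (i + PySem.Str.len p)) = p.toList
    then some (p, r) else markovFind tape i rs

-- A's while loop over state (tape, i); fuel is a port artifact for the while loop: under
-- Pre_markov every iteration shrinks len(tape) - i by at least 1, so len + 1 fuel never runs out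
def markovLoop (rules : List (String × String)) : Nat → List Char → Int → List Char
  | 0, tape, _ => tape
  | f + 1, tape, i =>
    if i < (tape.length : Int) then
      match markovFind tape i rules with
      | some (p, r) =>
          markovLoop rules f
            (PySem.List.slice tape none (some i) ++ r.toList
              ++ PySem.List.slice tape (some (i + PySem.Str.len p)) none)
            (i + PySem.Str.len r)
      | none => markovLoop rules f tape (i + 1)
    else tape

def markov (input_string : String) (rules : List (String × String)) : String :=
  String.ofList (markovLoop rules (input_string.toList.length + 1) input_string.toList 0)

-- ===== PORT B =====
-- the inner for/else on the remaining suffix: first rule with rest.startswith(pattern);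
-- yields that rule's replacement (as chars) together with rest stripped of the pattern
def altFind : List (String × String) → List Char → Option (List Char × List Char)
  | [], _ => none
  | (p, r) :: rs, rest =>
    if PySem.Chars.startswith rest p.toList
    then some (r.toList, rest.drop p.toList.length)
    else altFind rs rest

-- B's while loop: the state is only the remaining suffix; the emitted pieces are returned
-- already concatenated (''.join of the piece list); fuel is the same while-loop port artifact:
-- under Pre_markov each step consumes at least one character of the suffix
def altGo (rules : List (String × String)) : Nat → List Char → List Char
  | 0, _ => []
  | _ + 1, [] => []
  | f + 1, c :: cs =>
    match altFind rules (c :: cs) with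
    | some (rep, rest') => rep ++ altGo rules f rest'
    | none => c :: altGo rules f cs

def markov_alt (input_string : String) (rules : List (String × String)) : String :=
  String.ofList (altGo rules (input_string.toList.length + 1) input_string.toList)

-- ===== PRECONDITION & SPEC =====
-- Pre_ excludes rule lists containing an empty pattern (unless the input string is empty):
-- once a position reaches the empty pattern both programs loop forever, and on the remaining
-- such inputs (an earlier rule happens to match at every position) A returns a value B matches;
-- the exclusion is only so that the fueled Lean loops terminate.
def Pre_markov (input_string : String) (rules : List (String × String)) : Prop :=
  input_string = "" ∨ ∀ pr ∈ rules, pr.1 ≠ ""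
instance (input_string : String) (rules : List (String × String)) : Decidable (Pre_markov input_string rules) := by unfold Pre_markov; infer_instance

def pvWitness_markov : String × (List (String × String)) := ("abcab", [("ab", "X"), ("c", "")])

def Spec_markov (input_string : String) (rules : List (String × String)) (out : String) : Prop := out = markov_alt input_string rules
instance (input_string : String) (rules : List (String × String)) (out : String) : Decidable (Spec_markov input_string rules out) := by unfold Spec_markov; infer_instance

-- ===== CLAIM (what is proved, stated in full; the proofs are below) =====
def Claim_equal_markov : Prop := ∀ (input_string : String) (rules : List (String × String)), Dom_markov input_string rules → Pre_markov input_string rules → Spec_markov input_string rules (markov input_string rules)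

-- ===== LEMMAS AND PROOFS =====

-- the slice test of A at a Nat offset is the prefix test on the suffix
theorem markov_slice_prefix (tape : List Char) (p : String) (j : Nat) :
    (PySem.List.slice tape (some (j : Int)) (some ((j : Int) + PySem.Str.len p)) = p.toList)
      ↔ p.toList <+: tape.drop j := by
  have hlen : PySem.Str.len p = ((p.toList.length : Nat) : Int) := by
    simp [PySem.Str.len_eq]
  rw [hlen, PySem.List.slice_natCast_add]
  constructor
  · intro h
    rw [List.prefix_iff_eq_take]
    exact h.symm
  · intro h
    exact ((List.prefix_iff_eq_take).mp h).symm

-- the two rule scans correspond: on tape = acc ++ rest at offset |acc|, A's scan misses iff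
-- B's scan on rest misses, and a hit is the same rule, whose pattern prefixes rest
theorem find_rel (acc rest : List Char) : ∀ rules : List (String × String),
    (markovFind (acc ++ rest) ((acc.length : Nat) : Int) rules = none
        ∧ altFind rules rest = none)
    ∨ ∃ p r, (p, r) ∈ rules
        ∧ markovFind (acc ++ rest) ((acc.length : Nat) : Int) rules = some (p, r)
        ∧ altFind rules rest = some (r.toList, rest.drop p.toList.length)
        ∧ p.toList <+: rest := by
  intro rules
  induction rules with
  | nil => exact Or.inl ⟨rfl, rfl⟩
  | cons pr rs ih =>
    obtain ⟨p, r⟩ := pr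
    have hdrop : (acc ++ rest).drop acc.length = rest := List.drop_left
    have hp : (PySem.List.slice (acc ++ rest) (some ((acc.length : Nat) : Int))
          (some (((acc.length : Nat) : Int) + PySem.Str.len p)) = p.toList)
        ↔ (PySem.Chars.startswith rest p.toList = true) := by
      rw [PySem.Chars.startswith_iff]
      have hiff := markov_slice_prefix (acc ++ rest) p acc.length
      rw [hdrop] at hiff
      exact hiff
    simp only [markovFind, altFind]
    by_cases h : PySem.Chars.startswith rest p.toList = true
    · refine Or.inr ⟨p, r, List.mem_cons_self, ?_, ?_, (PySem.Chars.startswith_iff _ _).mp h⟩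
      · rw [if_pos (hp.mpr h)]
      · rw [if_pos h]
    · rw [if_neg (fun hc => h (hp.mp hc)), if_neg h]
      rcases ih with ⟨h1, h2⟩ | ⟨q, t, hm, hA, hB, hpre⟩
      · exact Or.inl ⟨h1, h2⟩
      · exact Or.inr ⟨q, t, List.mem_cons_of_mem _ hm, hA, hB, hpre⟩

-- main invariant: A's state (acc ++ rest, |acc|) describes B's state rest, with acc the pieces
-- already emitted; both loops then produce acc ++ altGo … rest
theorem loop_eq (rules : List (String × String)) (h : ∀ pr ∈ rules, pr.1 ≠ "") :
    ∀ (f : Nat) (acc rest : List Char), rest.length < f →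
      markovLoop rules f (acc ++ rest) ((acc.length : Nat) : Int) = acc ++ altGo rules f rest := by
  intro f
  induction f with
  | zero => intro acc rest hf; omega
  | succ f ih =>
    intro acc rest hf
    cases rest with
    | nil =>
      simp [markovLoop, altGo]
    | cons c cs =>
      have hcond : ((acc.length : Nat) : Int) < (((acc ++ c :: cs).length : Nat) : Int) := by
        simp [List.length_append]
      rw [markovLoop, altGo, if_pos hcond]
      rcases find_rel acc (c :: cs) rules with ⟨hA, hB⟩ | ⟨p, r, hm, hA, hB, hpre⟩
      · rw [hA, hB]
        dsimp only
        have htape : acc ++ c :: cs = (acc ++ [c]) ++ cs := by simp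
        have hi : ((acc.length : Nat) : Int) + 1 = (((acc ++ [c]).length : Nat) : Int) := by simp
        rw [htape, hi, ih (acc ++ [c]) cs (by simp at hf ⊢; omega)]
        simp
      · rw [hA, hB]
        dsimp only
        have hplen : 1 ≤ p.toList.length := by
          have hne := h (p, r) hm
          cases hpl : p.toList with
          | nil => exact absurd (String.toList_eq_nil_iff.mp hpl) hne
          | cons _ _ => simp
        have hs1 : PySem.List.slice (acc ++ c :: cs) none (some ((acc.length : Nat) : Int))
            = acc := by
          rw [PySem.List.slice_to_natCast]
          exact List.take_left
        have hlenp : PySem.Str.len p = ((p.toList.length : Nat) : Int) := by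
          simp [PySem.Str.len_eq]
        have hs2 : PySem.List.slice (acc ++ c :: cs)
            (some (((acc.length : Nat) : Int) + PySem.Str.len p)) none
            = (c :: cs).drop p.toList.length := by
          rw [hlenp]
          have hcast : ((acc.length : Nat) : Int) + ((p.toList.length : Nat) : Int)
              = (((acc.length + p.toList.length : Nat)) : Int) := by push_cast; ring
          rw [hcast, PySem.List.slice_from_natCast, ← List.drop_drop, List.drop_left]
        have hlenr : ((acc.length : Nat) : Int) + PySem.Str.len r
            = (((acc ++ r.toList).length : Nat) : Int) := by
          simp [PySem.Str.len_eq]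
        rw [hs1, hs2, hlenr]
        have hrlen : ((c :: cs).drop p.toList.length).length < f := by
          have := hpre.length_le
          simp only [List.length_drop, List.length_cons] at *
          omega
        rw [show acc ++ r.toList ++ (c :: cs).drop p.toList.length
              = (acc ++ r.toList) ++ (c :: cs).drop p.toList.length from by simp,
            ih (acc ++ r.toList) ((c :: cs).drop p.toList.length) hrlen]
        simp

-- ===== VERDICT (by name: the statement is the Claim_ definition above) =====
theorem markov_spec : Claim_equal_markov := by
  intro s rules _ hpre
  unfold Spec_markov markov markov_alt
  rcases hpre with hemp | hne
  · subst hemp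
    simp [markovLoop, altGo]
  · have := loop_eq rules hne (s.toList.length + 1) [] s.toList (by omega)
    simp only [List.nil_append, List.length_nil, Nat.cast_zero] at this
    exact congrArg String.ofList this
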